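-- pv_equiv track=rewrite | github.com/thomasbradley99/ai-vision | hooper-glean/hooper/utils.py | filter_consecutive_numbers
-- ===== SOURCE A (Python) =====
-- from typing import Dict, List, Tuple, Optional, Union
--
-- def filter_consecutive_numbers(lst: List, thres: int = 3) -> List:
--     """Set indices to None unless there are a minimum of `thres` consecutive appearances.
--     @param used in possession classification
--     """
--     result = lst[:]
--     n = len(lst)
--     i = 0
--     while i < n:
--         if lst[i] is not None:
--             count = 1
--             while i + count < n and lst[i + count] == lst[i]:
--                 count += 1
--             if count < thres:
--                 for j in range(count):
--                     result[i + j] = None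
--             i += count
--         else:
--             i += 1
--     return result
-- ===== SOURCE B (Python) =====
-- from typing import List
--
--
-- def filter_consecutive_numbers(lst: List, thres: int = 3) -> List:
--     """Set indices to None unless there are a minimum of `thres` consecutive appearances."""
--     # Phase 1: split the list into maximal runs of equal values.
--     runs = []
--     for x in lst:
--         if runs and x == runs[-1][0]:
--             runs[-1].append(x)
--         else:
--             runs.append([x])
--     # Phase 2: emit each run, nulling short non-None runs.
--     out = []
--     for run in runs:
--         if run[0] is not None and len(run) < thres:
--             out.extend([None] * len(run))
--         else:
--             out.extend(run)
--     return out
-- ===== Notes on version B (the rewrite author's own statement) =====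
-- stated objective: alternative
-- what changed: B replaces A's index-based two-pointer scan with in-place mutation of a copy by a two-phase pass: first group the list into maximal runs of equal values, then emit each run, replacing short non-None runs by Nones.
import Mathlib
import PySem

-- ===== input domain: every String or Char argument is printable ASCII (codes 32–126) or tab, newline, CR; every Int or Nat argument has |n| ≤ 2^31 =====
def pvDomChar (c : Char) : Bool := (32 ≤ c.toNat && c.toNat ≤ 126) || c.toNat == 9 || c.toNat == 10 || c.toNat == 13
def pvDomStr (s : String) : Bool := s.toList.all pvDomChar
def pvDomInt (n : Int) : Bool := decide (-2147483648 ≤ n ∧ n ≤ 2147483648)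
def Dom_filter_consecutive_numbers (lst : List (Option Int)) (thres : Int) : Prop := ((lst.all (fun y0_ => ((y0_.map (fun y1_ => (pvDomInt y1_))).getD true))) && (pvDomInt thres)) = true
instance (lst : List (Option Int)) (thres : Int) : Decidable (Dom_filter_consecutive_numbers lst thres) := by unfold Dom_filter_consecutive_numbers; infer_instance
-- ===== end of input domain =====

-- B replaces A's index-based two-pointer scan with a two-phase run-grouping pass (alternative decomposition of the same cost; equivalence is about the return value — A mutates only its own local copy).

-- ===== PORT A =====
-- inner `while i + count < n and lst[i + count] == lst[i]: count += 1`
def pyCount (lst : List (Option Int)) (i : Nat) (count : Nat) : Nat :=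
  if i + count < lst.length ∧ lst.getD (i + count) none = lst.getD i none then
    pyCount lst i (count + 1)
  else count
termination_by lst.length - (i + count)
decreasing_by omega

-- the port's termination needs count ≥ 1, so this lemma stays above it
theorem pyCount_ge (lst : List (Option Int)) (i count : Nat) : count ≤ pyCount lst i count := by
  rw [pyCount]
  split
  · exact le_trans (Nat.le_succ count) (pyCount_ge lst i (count + 1))
  · exact le_refl _
termination_by lst.length - (i + count)
decreasing_by omega

-- `for j in range(count): result[i + j] = None`
def setNones (result : List (Option Int)) (i count : Nat) : List (Option Int) :=
  (List.range count).foldl (fun r j => r.set (i + j) none) result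

-- the outer `while i < n` loop; `result` is A's local copy being updated
def aLoop (lst : List (Option Int)) (thres : Int) (i : Nat) (result : List (Option Int)) : List (Option Int) :=
  if i < lst.length then
    if lst.getD i none ≠ none then
      let count := pyCount lst i 1
      let result' := if (count : Int) < thres then setNones result i count else result
      aLoop lst thres (i + count) result'
    else
      aLoop lst thres (i + 1) result
  else result
termination_by lst.length - i
decreasing_by
  · have := pyCount_ge lst i 1; omega
  · omega

def filter_consecutive_numbers (lst : List (Option Int)) (thres : Int) : List (Option Int) :=
  aLoop lst thres 0 lst

-- ===== PORT B =====
-- one step of B's first loop: append x to the last run or start a new run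
def stepRun (runs : List (List (Option Int))) (x : Option Int) : List (List (Option Int)) :=
  if runs ≠ [] ∧ x = (runs.getLastD []).headD none then
    runs.dropLast ++ [runs.getLastD [] ++ [x]]
  else runs ++ [[x]]

def buildRuns (lst : List (Option Int)) : List (List (Option Int)) :=
  lst.foldl stepRun []

-- one step of B's second loop
def emitRun (thres : Int) (out : List (Option Int)) (run : List (Option Int)) : List (Option Int) :=
  if run.headD none ≠ none ∧ (run.length : Int) < thres then out ++ List.replicate run.length none
  else out ++ run

def filter_consecutive_numbers_alt (lst : List (Option Int)) (thres : Int) : List (Option Int) :=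
  (buildRuns lst).foldl (emitRun thres) []

-- ===== PRECONDITION & SPEC =====
def Spec_filter_consecutive_numbers (lst : List (Option Int)) (thres : Int) (out : List (Option Int)) : Prop := out = filter_consecutive_numbers_alt lst thres
instance (lst : List (Option Int)) (thres : Int) (out : List (Option Int)) : Decidable (Spec_filter_consecutive_numbers lst thres out) := by unfold Spec_filter_consecutive_numbers; infer_instance

-- ===== CLAIM (what is proved, stated in full; the proofs are below) =====
def Claim_equal_filter_consecutive_numbers : Prop := ∀ (lst : List (Option Int)) (thres : Int), Dom_filter_consecutive_numbers lst thres → Spec_filter_consecutive_numbers lst thres (filter_consecutive_numbers lst thres)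

-- ===== LEMMAS AND PROOFS =====

-- canonical structural description of the result, to which both ports are reduced
def gA (thres : Int) : List (Option Int) → List (Option Int)
  | [] => []
  | x :: xs =>
    let t := xs.takeWhile (fun y => decide (y = x))
    let d := xs.dropWhile (fun y => decide (y = x))
    if x ≠ none ∧ ((t.length + 1 : Nat) : Int) < thres then
      List.replicate (t.length + 1) none ++ gA thres d
    else
      (x :: t) ++ gA thres d
termination_by l => l.length
decreasing_by
  · have := List.length_dropWhile_le (fun y => decide (y = x)) xs; simpa using Nat.lt_succ_of_le this
  · have := List.length_dropWhile_le (fun y => decide (y = x)) xs; simpa using Nat.lt_succ_of_le this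

-- recursive run decomposition (what buildRuns computes)
def runsB : List (Option Int) → List (List (Option Int))
  | [] => []
  | x :: xs =>
    (x :: xs.takeWhile (fun y => decide (y = x))) :: runsB (xs.dropWhile (fun y => decide (y = x)))
termination_by l => l.length
decreasing_by
  have := List.length_dropWhile_le (fun y => decide (y = x)) xs; simpa using Nat.lt_succ_of_le this

theorem runsB_cons (x : Option Int) (xs : List (Option Int)) :
    runsB (x :: xs) =
      (x :: xs.takeWhile (fun y => decide (y = x))) :: runsB (xs.dropWhile (fun y => decide (y = x))) := by
  rw [runsB]

theorem gA_cons (thres : Int) (x : Option Int) (xs : List (Option Int)) :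
    gA thres (x :: xs) =
      if x ≠ none ∧ (((xs.takeWhile (fun y => decide (y = x))).length + 1 : Nat) : Int) < thres then
        List.replicate ((xs.takeWhile (fun y => decide (y = x))).length + 1) none
          ++ gA thres (xs.dropWhile (fun y => decide (y = x)))
      else (x :: xs.takeWhile (fun y => decide (y = x))) ++ gA thres (xs.dropWhile (fun y => decide (y = x))) := by
  rw [gA]

theorem drop_getD_cons (lst : List (Option Int)) (i : Nat) (h : i < lst.length) :
    lst.drop i = lst.getD i none :: lst.drop (i + 1) := by
  rw [List.drop_eq_getElem_cons h]
  congr 1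
  rw [List.getD_eq_getElem?_getD, List.getElem?_eq_getElem h]
  rfl

theorem pyCount_spec (lst : List (Option Int)) (i count : Nat) :
    pyCount lst i count =
      count + ((lst.drop (i + count)).takeWhile (fun y => decide (y = lst.getD i none))).length := by
  rw [pyCount]
  split
  case isTrue h =>
    rw [pyCount_spec lst i (count + 1)]
    rw [drop_getD_cons lst (i + count) h.1]
    rw [List.takeWhile_cons_of_pos (by simpa using h.2)]
    rw [List.length_cons]
    have he : i + (count + 1) = i + count + 1 := by omega
    rw [he]
    omega
  case isFalse h =>
    rcases Nat.lt_or_ge (i + count) lst.length with hlt | hge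
    · have hne : lst.getD (i + count) none ≠ lst.getD i none := fun he => h ⟨hlt, he⟩
      rw [drop_getD_cons lst (i + count) hlt]
      rw [List.takeWhile_cons_of_neg (by simpa using hne)]
      simp
    · rw [List.drop_eq_nil_of_le hge]
      simp
termination_by lst.length - (i + count)
decreasing_by omega

theorem setNones_spec (i : Nat) (count : Nat) (pre suf : List (Option Int))
    (hp : pre.length = i) (hc : count ≤ suf.length) :
    setNones (pre ++ suf) i count = pre ++ List.replicate count none ++ suf.drop count := by
  induction count with
  | zero => simp [setNones]
  | succ c ih =>
    have ih' := ih (Nat.le_of_succ_le hc)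
    unfold setNones at ih' ⊢
    rw [List.range_succ, List.foldl_append, ih']
    simp only [List.foldl_cons, List.foldl_nil]
    have hclen : c < suf.length := hc
    rw [List.append_assoc]
    rw [List.set_append_right _ _ (by omega : pre.length ≤ i + c)]
    rw [List.set_append_right _ _ (by simp [hp] : (List.replicate c (none : Option Int)).length ≤ i + c - pre.length)]
    have hidx : i + c - pre.length - (List.replicate c (none : Option Int)).length = 0 := by
      simp [hp]
    rw [hidx]
    rw [List.drop_eq_getElem_cons hclen]
    rw [List.set_cons_zero]
    simp [List.replicate_succ']

theorem gA_prefix_none (thres : Int) (p rest : List (Option Int))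
    (hall : ∀ a ∈ p, a = none) (hh : rest.head? ≠ some none) :
    gA thres (p ++ rest) = p ++ gA thres rest := by
  match p with
  | [] => simp
  | a :: p' =>
    have ha : a = none := hall a (by simp)
    subst ha
    rw [List.cons_append, gA]
    have hall' : ∀ b ∈ p', b = (none : Option Int) := fun b hb => hall b (by simp [hb])
    have h1 : p'.takeWhile (fun y => decide (y = (none : Option Int))) = p' :=
      List.takeWhile_eq_self_iff.mpr (fun b hb => by simp [hall' b hb])
    have h2 : rest.takeWhile (fun y => decide (y = (none : Option Int))) = [] := by
      cases rest with
      | nil => simp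
      | cons r rs =>
        have : r ≠ none := by intro h; exact hh (by simp [h])
        simp [this]
    have htw : (p' ++ rest).takeWhile (fun y => decide (y = (none : Option Int))) = p' := by
      rw [List.takeWhile_append]
      split
      · rw [h2, List.append_nil]
      · exact h1
    have hdw : (p' ++ rest).dropWhile (fun y => decide (y = (none : Option Int))) = rest := by
      have := List.takeWhile_append_dropWhile (p := fun y => decide (y = (none : Option Int))) (l := p' ++ rest)
      rw [htw] at this
      exact List.append_cancel_left this
    simp only [htw, hdw]
    simp

theorem gA_cons_none (thres : Int) (xs : List (Option Int)) :
    gA thres (none :: xs) = none :: gA thres xs := by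
  rw [gA]
  simp only [ne_eq, not_true_eq_false, false_and, if_false]
  have hall : ∀ a ∈ xs.takeWhile (fun y => decide (y = (none : Option Int))), a = (none : Option Int) := by
    intro a ha
    have := List.mem_takeWhile_imp ha
    simpa using this
  have hh : (xs.dropWhile (fun y => decide (y = (none : Option Int)))).head? ≠ some none := by
    intro h
    have := List.head?_dropWhile_not (p := fun y => decide (y = (none : Option Int))) (l := xs)
    rw [h] at this
    simp at this
  have := gA_prefix_none thres (xs.takeWhile (fun y => decide (y = (none : Option Int))))
      (xs.dropWhile (fun y => decide (y = (none : Option Int)))) hall hh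
  rw [List.takeWhile_append_dropWhile] at this
  rw [this]
  simp

theorem aLoop_eq (lst : List (Option Int)) (thres : Int) :
    ∀ i pre, pre.length = i →
      aLoop lst thres i (pre ++ lst.drop i) = pre ++ gA thres (lst.drop i) := by
  intro i
  induction hn : lst.length - i using Nat.strong_induction_on generalizing i with
  | _ n ih =>
  intro pre hp
  rw [aLoop]
  by_cases hi : i < lst.length
  · have hd : lst.drop i = lst.getD i none :: lst.drop (i + 1) := drop_getD_cons lst i hi
    by_cases hx : lst.getD i none = none
    · -- None: skip one
      simp only [hi, if_true, hx, ne_eq, not_true_eq_false, if_false]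
      have step : pre ++ lst.drop i = (pre ++ [none]) ++ lst.drop (i + 1) := by
        rw [hd, hx]; simp
      rw [step]
      rw [ih (lst.length - (i+1)) (by omega) (i+1) rfl (pre ++ [none]) (by simp [hp])]
      rw [hd, hx, gA_cons_none]
      try simp
    · -- a value: count the run
      simp only [hi, if_true, ne_eq, hx, not_false_eq_true, if_true]
      set x := lst.getD i none with hxdef
      have hcount : pyCount lst i 1 =
          1 + ((lst.drop (i + 1)).takeWhile (fun y => decide (y = x))).length := pyCount_spec lst i 1
      set t := (lst.drop (i + 1)).takeWhile (fun y => decide (y = x)) with ht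
      set d := (lst.drop (i + 1)).dropWhile (fun y => decide (y = x)) with hdw
      have htd : t ++ d = lst.drop (i + 1) := List.takeWhile_append_dropWhile
      have hdropc : (lst.drop i).drop (pyCount lst i 1) = d := by
        rw [hd, hcount, Nat.add_comm 1 t.length]
        simp only [List.drop_succ_cons]
        rw [← htd]
        simp
      have hdrop_ic : lst.drop (i + pyCount lst i 1) = d := by
        rw [← hdropc, List.drop_drop]
      have hlen : pyCount lst i 1 ≤ (lst.drop i).length := by
        have h1 : t.length ≤ (lst.drop (i+1)).length := by
          rw [ht]; exact (List.takeWhile_prefix _).length_le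
        simp only [List.length_drop] at h1 ⊢
        omega
      have hrun : (lst.drop i).take (pyCount lst i 1) = x :: t := by
        have h1 : (lst.drop (i+1)).take t.length = t := by
          rw [ht]
          exact ((List.prefix_iff_eq_take).mp (List.takeWhile_prefix _)).symm
        rw [hd, hcount, Nat.add_comm 1 t.length]
        simp only [List.take_succ_cons]
        rw [h1]
      have hga : gA thres (lst.drop i) =
          if x ≠ none ∧ ((t.length + 1 : Nat) : Int) < thres then
            List.replicate (t.length + 1) none ++ gA thres d
          else (x :: t) ++ gA thres d := by
        rw [hd, gA]
      have hpos : 1 ≤ pyCount lst i 1 := pyCount_ge lst i 1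
      by_cases hth : ((pyCount lst i 1 : Nat) : Int) < thres
      · simp only [hth, if_true]
        rw [setNones_spec i (pyCount lst i 1) pre (lst.drop i) hp hlen]
        rw [hdropc]
        have : pre ++ List.replicate (pyCount lst i 1) none ++ d
            = (pre ++ List.replicate (pyCount lst i 1) none) ++ lst.drop (i + pyCount lst i 1) := by
          rw [hdrop_ic, List.append_assoc]
        rw [this]
        rw [ih (lst.length - (i + pyCount lst i 1)) (by omega) (i + pyCount lst i 1) rfl _ (by simp [hp])]
        rw [hga]
        have hcond : x ≠ none ∧ ((t.length + 1 : Nat) : Int) < thres := by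
          constructor
          · exact hx
          · rw [hcount] at hth; push_cast at hth ⊢; omega
        rw [if_pos hcond]
        rw [hdrop_ic, hcount]
        simp [Nat.add_comm 1 t.length]
      · simp only [hth, if_false]
        have step : pre ++ lst.drop i = (pre ++ (x :: t)) ++ lst.drop (i + pyCount lst i 1) := by
          rw [hdrop_ic, ← hdropc, List.append_assoc, ← hrun, List.take_append_drop]
        rw [step]
        rw [ih (lst.length - (i + pyCount lst i 1)) (by omega) (i + pyCount lst i 1) rfl _
          (by simp [hp, hcount]; omega)]
        rw [hga]
        have hcond : ¬ (x ≠ none ∧ ((t.length + 1 : Nat) : Int) < thres) := by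
          intro ⟨_, h2⟩
          apply hth
          rw [hcount]; push_cast at h2 ⊢; omega
        rw [if_neg hcond]
        rw [hdrop_ic]
        simp
  · simp only [hi, if_false]
    rw [List.drop_eq_nil_of_le (by omega)]
    simp [gA]

theorem foldl_stepRun_prefix (xs : List (Option Int)) :
    ∀ (completed rs : List (List (Option Int))), rs ≠ [] →
      xs.foldl stepRun (completed ++ rs) = completed ++ xs.foldl stepRun rs := by
  induction xs with
  | nil => intro c rs _; simp
  | cons y ys ih =>
    intro c rs hrs
    simp only [List.foldl_cons]
    have hg : (c ++ rs).getLastD [] = rs.getLastD [] := by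
      rw [List.getLastD_eq_getLast?, List.getLastD_eq_getLast?, List.getLast?_append_of_ne_nil _ hrs]
    have hstep : stepRun (c ++ rs) y = c ++ stepRun rs y := by
      unfold stepRun
      by_cases hcnd : y = (rs.getLastD []).headD none
      · rw [if_pos ⟨by simp [hrs], by rw [hg]; exact hcnd⟩, if_pos ⟨hrs, hcnd⟩, hg,
          List.dropLast_append_of_ne_nil hrs, List.append_assoc]
      · rw [if_neg (fun hc => hcnd (hg ▸ hc.2)), if_neg (fun hc => hcnd hc.2), List.append_assoc]
    rw [hstep]
    have hne : stepRun rs y ≠ [] := by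
      unfold stepRun
      split <;> simp
    exact ih c (stepRun rs y) hne

theorem foldl_stepRun_run (xs : List (Option Int)) :
    ∀ (k : Option Int) (r : List (Option Int)),
      xs.foldl stepRun [k :: r] =
        (k :: (r ++ xs.takeWhile (fun y => decide (y = k)))) :: runsB (xs.dropWhile (fun y => decide (y = k))) := by
  induction xs with
  | nil => intro k r; simp [runsB]
  | cons y ys ih =>
    intro k r
    simp only [List.foldl_cons]
    by_cases hy : y = k
    · have hstep : stepRun [k :: r] y = [k :: (r ++ [y])] := by
        unfold stepRun
        simp [hy]
      rw [hstep, ih k (r ++ [y])]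
      simp [hy]
    · have hstep : stepRun [k :: r] y = [k :: r] ++ [[y]] := by
        unfold stepRun
        simp [hy]
      rw [hstep, foldl_stepRun_prefix ys [k :: r] [[y]] (by simp)]
      rw [ih y []]
      simp [hy, runsB_cons]

theorem buildRuns_eq (lst : List (Option Int)) : buildRuns lst = runsB lst := by
  cases lst with
  | nil => simp [buildRuns, runsB]
  | cons x xs =>
    unfold buildRuns
    simp only [List.foldl_cons]
    have h0 : stepRun [] x = [[x]] := by unfold stepRun; simp
    rw [h0, foldl_stepRun_run xs x []]
    rw [runsB]
    simp

theorem foldl_emit_runsB (thres : Int) (l : List (Option Int)) :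
    ∀ out, (runsB l).foldl (emitRun thres) out = out ++ gA thres l := by
  induction hn : l.length using Nat.strong_induction_on generalizing l with
  | _ n ih =>
  intro out
  cases l with
  | nil => simp [runsB, gA]
  | cons x xs =>
    rw [runsB_cons, gA_cons]
    simp only [List.foldl_cons]
    have hdlen : (xs.dropWhile (fun y => decide (y = x))).length < n := by
      have h1 := List.length_dropWhile_le (fun y => decide (y = x)) xs
      simp only [List.length_cons] at hn
      omega
    rw [ih (xs.dropWhile (fun y => decide (y = x))).length hdlen _ rfl]
    by_cases hc : x ≠ none ∧ (((xs.takeWhile (fun y => decide (y = x))).length + 1 : Nat) : Int) < thres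
    · rw [if_pos hc]
      have he : emitRun thres out (x :: xs.takeWhile (fun y => decide (y = x)))
          = out ++ List.replicate ((xs.takeWhile (fun y => decide (y = x))).length + 1) none := by
        unfold emitRun
        rw [if_pos ⟨by simpa using hc.1, by simpa [Nat.add_comm] using hc.2⟩]
        simp [Nat.add_comm]
      rw [he]
      simp
    · rw [if_neg hc]
      have he : emitRun thres out (x :: xs.takeWhile (fun y => decide (y = x)))
          = out ++ (x :: xs.takeWhile (fun y => decide (y = x))) := by
        unfold emitRun
        rw [if_neg (fun hcc => hc ⟨by simpa using hcc.1, by simpa [Nat.add_comm] using hcc.2⟩)]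
      rw [he]
      simp

-- ===== VERDICT (by name: the statement is the Claim_ definition above) =====
theorem filter_consecutive_numbers_spec : Claim_equal_filter_consecutive_numbers := by
  intro lst thres _
  unfold Spec_filter_consecutive_numbers filter_consecutive_numbers filter_consecutive_numbers_alt
  rw [buildRuns_eq, foldl_emit_runsB]
  have := aLoop_eq lst thres 0 [] rfl
  simpa using this
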